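-- pv_equiv track=rewrite | github.com/ibeex/blue_cli | src/blue_cli/ai_service.py | _find_best_artist_match
-- ===== SOURCE A (Python) =====
-- def _find_best_artist_match(albums: list, target_artist: str) -> dict | None:
--     """Find the album with the best artist name match using guard clauses."""
--     target_lower = target_artist.lower()
--
--     # Guard clause: exact matches (case insensitive)
--     for album in albums:
--         if album["artist"].lower() == target_lower:
--             return album
--
--     # Guard clause: partial matches
--     for album in albums:
--         album_artist_lower = album["artist"].lower()
--         if target_lower in album_artist_lower or album_artist_lower in target_lower:
--             return album
--
--     # Guard clause: normalized versions (remove periods, spaces)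
--     target_normalized = target_lower.replace(".", "").replace(" ", "")
--     for album in albums:
--         album_normalized = album["artist"].lower().replace(".", "").replace(" ", "")
--         if target_normalized == album_normalized:
--             return album
--
--     return None
-- ===== SOURCE B (Python) =====
-- def _find_best_artist_match(albums: list, target_artist: str) -> dict | None:
--     """Single pass: return on exact match; otherwise remember the first partial
--     and the first normalized match and pick partial > normalized at the end."""
--     target_lower = target_artist.lower()
--     target_normalized = target_lower.replace(".", "").replace(" ", "")
--     first_partial = None
--     first_normalized = None
--     for album in albums:
--         album_artist_lower = album["artist"].lower()
--         if album_artist_lower == target_lower: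
--             return album
--         if target_lower in album_artist_lower or album_artist_lower in target_lower:
--             if first_partial is None:
--                 first_partial = album
--         elif first_normalized is None and target_normalized == album_artist_lower.replace(".", "").replace(" ", ""):
--             first_normalized = album
--     return first_partial if first_partial is not None else first_normalized
-- ===== Notes on version B (the rewrite author's own statement) =====
-- stated objective: alternative
-- what changed: Replaced A's three sequential scans over the album list (exact pass, then partial pass, then normalized pass, each recomputing lowercased artists) by one single pass that returns immediately on an exact match and otherwise tracks the first partial and first normalized candidate in two accumulators.
import Mathlib
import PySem

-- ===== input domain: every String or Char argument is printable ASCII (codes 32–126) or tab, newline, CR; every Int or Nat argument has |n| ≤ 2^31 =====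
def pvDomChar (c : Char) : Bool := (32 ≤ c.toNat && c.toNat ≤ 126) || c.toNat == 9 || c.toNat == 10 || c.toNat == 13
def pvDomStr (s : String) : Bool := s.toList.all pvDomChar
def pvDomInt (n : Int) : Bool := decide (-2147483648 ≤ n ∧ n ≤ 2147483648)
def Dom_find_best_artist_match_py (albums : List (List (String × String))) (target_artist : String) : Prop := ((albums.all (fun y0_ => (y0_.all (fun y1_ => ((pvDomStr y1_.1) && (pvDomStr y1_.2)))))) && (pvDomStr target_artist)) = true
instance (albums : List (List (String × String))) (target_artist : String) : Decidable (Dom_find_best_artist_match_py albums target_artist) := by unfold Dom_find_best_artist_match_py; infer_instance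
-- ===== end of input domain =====

-- B replaces A's three sequential scans (exact, partial, normalized pass) by a single
-- pass that returns early on an exact match and tracks the first partial and first
-- normalized candidate in two accumulators.


-- ===== PORT A =====
-- album["artist"]; the `.getD ""` default is never reached under Pre_ (the key is present)
def pvArtist (alb : List (String × String)) : String :=
  ((PySem.Dict.mk alb).get? "artist").getD ""

-- album["artist"].lower() == target_lower
def pvExactP (tl : String) (alb : List (String × String)) : Bool :=
  PySem.Str.lower (pvArtist alb) == tl

-- target_lower in album_artist_lower or album_artist_lower in target_lower
def pvPartialP (tl : String) (alb : List (String × String)) : Bool :=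
  PySem.Str.isIn tl (PySem.Str.lower (pvArtist alb)) ||
    PySem.Str.isIn (PySem.Str.lower (pvArtist alb)) tl

-- target_normalized == album["artist"].lower().replace(".", "").replace(" ", "")
def pvNormP (tn : String) (alb : List (String × String)) : Bool :=
  tn == PySem.Str.replace (PySem.Str.replace (PySem.Str.lower (pvArtist alb)) "." "") " " ""

def find_best_artist_match_py (albums : List (List (String × String))) (target_artist : String) : Option (List (String × String)) :=
  let target_lower := PySem.Str.lower target_artist
  -- first loop: exact matches
  match albums.find? (pvExactP target_lower) with
  | some album => some album
  | none =>
    -- second loop: partial matches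
    match albums.find? (pvPartialP target_lower) with
    | some album => some album
    | none =>
      -- third loop: normalized versions
      let target_normalized :=
        PySem.Str.replace (PySem.Str.replace target_lower "." "") " " ""
      albums.find? (pvNormP target_normalized)

-- ===== PORT B =====
-- single pass: return on exact match, track first partial and first normalized match
def pvScanB (tl tn : String) :
    List (List (String × String)) → Option (List (String × String)) →
      Option (List (String × String)) → Option (List (String × String))
  | [], first_partial, first_normalized =>
    first_partial.orElse (fun _ => first_normalized)
  | album :: rest, first_partial, first_normalized =>
    if pvExactP tl album then some album
    else if pvPartialP tl album then
      pvScanB tl tn rest (first_partial.orElse (fun _ => some album)) first_normalized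
    else if first_normalized.isNone && pvNormP tn album then
      pvScanB tl tn rest first_partial (some album)
    else
      pvScanB tl tn rest first_partial first_normalized

def find_best_artist_match_py_alt (albums : List (List (String × String))) (target_artist : String) : Option (List (String × String)) :=
  let target_lower := PySem.Str.lower target_artist
  let target_normalized :=
    PySem.Str.replace (PySem.Str.replace target_lower "." "") " " ""
  pvScanB target_lower target_normalized albums none none

-- ===== PRECONDITION & SPEC =====
-- Pre_ excludes exactly the inputs on which A raises KeyError: some album lacks the
-- "artist" key and no album before the first such one is an exact match (an exact match
-- earlier in the list makes A return before reaching the keyless album).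
def Pre_find_best_artist_match_py (albums : List (List (String × String))) (target_artist : String) : Prop :=
  ((albums.all (fun alb => (PySem.Dict.mk alb).contains "artist")) ||
    ((albums.takeWhile (fun alb => (PySem.Dict.mk alb).contains "artist")).any
      (pvExactP (PySem.Str.lower target_artist)))) = true
instance (albums : List (List (String × String))) (target_artist : String) : Decidable (Pre_find_best_artist_match_py albums target_artist) := by unfold Pre_find_best_artist_match_py; infer_instance

def pvWitness_find_best_artist_match_py : (List (List (String × String))) × String :=
  ([[("artist", "AC DC")], [("artist", "A.C. D.C.")]], "ac dc")

def Spec_find_best_artist_match_py (albums : List (List (String × String))) (target_artist : String) (out : Option (List (String × String))) : Prop := out = find_best_artist_match_py_alt albums target_artist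
instance (albums : List (List (String × String))) (target_artist : String) (out : Option (List (String × String))) : Decidable (Spec_find_best_artist_match_py albums target_artist out) := by unfold Spec_find_best_artist_match_py; infer_instance

-- ===== CLAIM (what is proved, stated in full; the proofs are below) =====
def Claim_equal_find_best_artist_match_py : Prop := ∀ (albums : List (List (String × String))) (target_artist : String), Dom_find_best_artist_match_py albums target_artist → Pre_find_best_artist_match_py albums target_artist → Spec_find_best_artist_match_py albums target_artist (find_best_artist_match_py albums target_artist)

-- ===== LEMMAS AND PROOFS =====

-- the "normalized and not partial" predicate B effectively searches with
def pvQP (tl tn : String) (alb : List (String × String)) : Bool :=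
  !(pvPartialP tl alb) && pvNormP tn alb

-- the scan with accumulators, characterised by three find?s
lemma pvScanB_eq (tl tn : String) :
    ∀ (xs : List (List (String × String)))
      (fp fn : Option (List (String × String))),
      pvScanB tl tn xs fp fn =
        (xs.find? (pvExactP tl)).orElse (fun _ =>
          (fp.orElse (fun _ => xs.find? (pvPartialP tl))).orElse (fun _ =>
            fn.orElse (fun _ => xs.find? (pvQP tl tn)))) := by
  intro xs
  induction xs with
  | nil => intro fp fn; cases fp <;> cases fn <;> simp [pvScanB, Option.orElse]
  | cons a rest ih =>
    intro fp fn
    by_cases hE : pvExactP tl a = true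
    · simp [pvScanB, hE, List.find?_cons, Option.orElse]
    · have hE' : pvExactP tl a = false := by simpa using hE
      by_cases hP : pvPartialP tl a = true
      · have hQ : pvQP tl tn a = false := by simp [pvQP, hP]
        simp only [pvScanB, hE', hP, if_true, ih]
        simp [List.find?_cons, hE', hP, hQ]
      · have hP' : pvPartialP tl a = false := by simpa using hP
        by_cases hN : pvNormP tn a = true
        · have hQ : pvQP tl tn a = true := by simp [pvQP, hP', hN]
          cases fn with
          | none =>
            simp only [pvScanB, hE', if_false, hP', hN, Option.isNone_none,
              Bool.true_and, if_true, ih]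
            simp [List.find?_cons, hE', hP', hQ, Option.orElse]
          | some b =>
            simp only [pvScanB, hE', if_false, hP', Option.isNone_some,
              Bool.false_and, if_false, ih]
            simp [List.find?_cons, hE', hP', hQ, Option.orElse]
        · have hN' : pvNormP tn a = false := by simpa using hN
          have hQ : pvQP tl tn a = false := by simp [pvQP, hN']
          simp only [pvScanB, hE', if_false, hP', hN', Bool.and_false, if_false, ih]
          simp [List.find?_cons, hE', hP', hQ]

-- when no partial match exists, searching for pvQP is searching for pvNormP
lemma findQ_of_no_partial (tl tn : String) :
    ∀ (xs : List (List (String × String))),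
      xs.find? (pvPartialP tl) = none →
      xs.find? (pvQP tl tn) = xs.find? (pvNormP tn) := by
  intro xs
  induction xs with
  | nil => intro _; simp
  | cons a rest ih =>
    intro h
    cases hP : pvPartialP tl a with
    | true => rw [List.find?_cons_of_pos hP] at h; exact absurd h (by simp)
    | false =>
      rw [List.find?_cons_of_neg (by simp [hP])] at h
      have hQ : pvQP tl tn a = pvNormP tn a := by
        rw [pvQP, hP]; simp
      cases hN : pvNormP tn a with
      | true =>
        rw [List.find?_cons_of_pos (hQ.trans hN), List.find?_cons_of_pos hN]
      | false =>
        rw [List.find?_cons_of_neg (by simp [hQ, hN]),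
            List.find?_cons_of_neg (by simp [hN])]
        exact ih h

-- ===== VERDICT (by name: the statement is the Claim_ definition above) =====
theorem find_best_artist_match_py_spec : Claim_equal_find_best_artist_match_py := by
  intro albums target_artist _ _
  unfold Spec_find_best_artist_match_py
  unfold find_best_artist_match_py find_best_artist_match_py_alt
  rw [pvScanB_eq]
  cases hE : albums.find? (pvExactP (PySem.Str.lower target_artist)) with
  | some a => simp [hE, Option.orElse]
  | none =>
    cases hP : albums.find? (pvPartialP (PySem.Str.lower target_artist)) with
    | some a => simp [hE, hP, Option.orElse]
    | none =>
      rw [findQ_of_no_partial _ _ _ hP]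
      simp [hE, hP, Option.orElse]
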